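-- pv_equiv track=rewrite | github.com/kevinlondon/leetcode | 0000-0999/031_next_permutation.py | find_longest_non_increasing_suffix
-- ===== SOURCE A (Python) =====
-- def find_longest_non_increasing_suffix(nums):
--     last = float('-inf')
--     for i in range(len(nums)-1, -1, -1):
--         if nums[i] < last:
--             return i
--         else:
--             last = nums[i]
--     return -1
-- ===== SOURCE B (Python) =====
-- def find_longest_non_increasing_suffix(nums):
--     ans = -1
--     for i in range(len(nums) - 1):
--         if nums[i] < nums[i + 1]:
--             ans = i
--     return ans
-- ===== Notes on version B (the rewrite author's own statement) =====
-- stated objective: simpler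
-- what changed: Replaces A's right-to-left early-exit scan with a sentinel 'last' accumulator by a single forward pass over adjacent pairs that keeps the rightmost strictly-ascending index.
import Mathlib
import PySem

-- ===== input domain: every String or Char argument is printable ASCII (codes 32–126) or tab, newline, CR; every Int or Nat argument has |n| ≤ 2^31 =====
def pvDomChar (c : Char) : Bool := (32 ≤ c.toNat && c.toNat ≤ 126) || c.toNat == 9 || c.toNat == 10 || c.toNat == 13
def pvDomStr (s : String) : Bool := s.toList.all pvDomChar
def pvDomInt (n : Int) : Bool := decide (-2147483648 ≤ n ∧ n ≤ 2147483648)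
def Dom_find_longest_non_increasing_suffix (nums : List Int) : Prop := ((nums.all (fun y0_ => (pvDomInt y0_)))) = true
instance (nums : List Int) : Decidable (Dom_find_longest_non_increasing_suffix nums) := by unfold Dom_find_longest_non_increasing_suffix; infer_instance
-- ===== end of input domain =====

-- B replaces A's right-to-left early-exit scan (with a running 'last' sentinel) by a single
-- forward pass over adjacent pairs keeping the rightmost strictly-ascending index (simpler).

-- ===== PORT A =====
-- Early-exit loop over range(len-1, -1, -1); state: Sum.inl = returned index, Sum.inr = 'last'
-- (Option Int: none encodes float('-inf')).  nums[i] via pyGetD: every visited i is in range.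
def find_longest_non_increasing_suffix (nums : List Int) : Int :=
  match (PySem.List.pyRange ((nums.length : Int) - 1) (-1) (-1)).foldl
      (fun st i =>
        match st with
        | Sum.inl r => Sum.inl r
        | Sum.inr last =>
          let v := PySem.List.pyGetD nums i 0
          match last with
          | some l => if v < l then Sum.inl i else Sum.inr (some v)
          | none => Sum.inr (some v))
      (Sum.inr none : Int ⊕ Option Int) with
  | Sum.inl r => r
  | Sum.inr _ => -1

-- ===== PORT B =====
-- Forward pass over range(len-1): keep the rightmost i with nums[i] < nums[i+1], default -1.
def find_longest_non_increasing_suffix_alt (nums : List Int) : Int :=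
  (PySem.List.pyRange 0 ((nums.length : Int) - 1) 1).foldl
    (fun ans i =>
      if PySem.List.pyGetD nums i 0 < PySem.List.pyGetD nums (i + 1) 0 then i else ans)
    (-1)

-- ===== PRECONDITION & SPEC =====
def Spec_find_longest_non_increasing_suffix (nums : List Int) (out : Int) : Prop := out = find_longest_non_increasing_suffix_alt nums
instance (nums : List Int) (out : Int) : Decidable (Spec_find_longest_non_increasing_suffix nums out) := by unfold Spec_find_longest_non_increasing_suffix; infer_instance

-- ===== CLAIM (what is proved, stated in full; the proofs are below) =====
def Claim_equal_find_longest_non_increasing_suffix : Prop := ∀ (nums : List Int), Dom_find_longest_non_increasing_suffix nums → Spec_find_longest_non_increasing_suffix nums (find_longest_non_increasing_suffix nums)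

-- ===== LEMMAS AND PROOFS =====

-- nums[k] for an in-range Nat index cast to Int.
lemma pvGet (nums : List Int) (k : Nat) (h : k < nums.length) :
    PySem.List.pyGetD nums (k : Int) 0 = nums[k] := by
  have := PySem.List.pyGetD_eq_getElem (xs := nums) (i := (k : Int)) (d := 0)
    (Int.natCast_nonneg k) (by exact_mod_cast h)
  simpa using this

-- A's early return absorbs: once the state is inl r it stays inl r.
lemma pvStepA_absorb (nums : List Int) (l : List Int) (r : Int) :
    l.foldl
      (fun st i =>
        match st with
        | Sum.inl r => Sum.inl r
        | Sum.inr last =>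
          let v := PySem.List.pyGetD nums i 0
          match last with
          | some l => if v < l then Sum.inl i else Sum.inr (some v)
          | none => Sum.inr (some v))
      (Sum.inl r : Int ⊕ Option Int) = Sum.inl r := by
  induction l with
  | nil => rfl
  | cons x xs ih => simpa using ih

-- Core invariant: with 'last = nums[k+1]' and indices k, k-1, …, 0 left to scan, A's loop
-- computes the same value as B's forward fold over indices 0, …, k.
lemma pvMain (nums : List Int) : ∀ (k : Nat) (h : k + 1 < nums.length),
    (match (PySem.List.pyRange (k : Int) (-1) (-1)).foldl
        (fun st i =>
          match st with
          | Sum.inl r => Sum.inl r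
          | Sum.inr last =>
            let v := PySem.List.pyGetD nums i 0
            match last with
            | some l => if v < l then Sum.inl i else Sum.inr (some v)
            | none => Sum.inr (some v))
        (Sum.inr (some nums[k + 1]) : Int ⊕ Option Int) with
      | Sum.inl r => r
      | Sum.inr _ => -1)
    = (PySem.List.pyRange 0 ((k : Int) + 1) 1).foldl
        (fun ans i =>
          if PySem.List.pyGetD nums i 0 < PySem.List.pyGetD nums (i + 1) 0 then i else ans)
        (-1) := by
  intro k
  induction k with
  | zero =>
    intro h
    rw [PySem.List.pyRange_neg_one_cons (by simp),
        PySem.List.pyRange_neg_one_eq_nil (by simp),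
        PySem.List.pyRange_one_cons (by simp),
        PySem.List.pyRange_one_eq_nil (by simp)]
    simp only [List.foldl]
    have e0 : PySem.List.pyGetD nums ((0 : Nat) : Int) 0 = nums[0] := pvGet nums 0 (by omega)
    have e0' : PySem.List.pyGetD nums (0 : Int) 0 = nums[0] := by simpa using e0
    have e1 : PySem.List.pyGetD nums ((0 : Int) + 1) 0 = nums[0 + 1] := by
      have := pvGet nums 1 (by omega)
      simpa using this
    rw [e0, e0', e1]
    split_ifs <;> simp
  | succ k ih =>
    intro h
    have hk1 : k + 1 < nums.length := by omega
    have hcast : ((k + 1 : Nat) : Int) = (k : Int) + 1 := by push_cast; ring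
    rw [hcast, PySem.List.pyRange_neg_one_cons (by omega)]
    have hget : PySem.List.pyGetD nums ((k : Int) + 1) 0 = nums[k + 1] := by
      have := pvGet nums (k + 1) hk1
      simpa [hcast] using this
    have hget2 : PySem.List.pyGetD nums ((k : Int) + 1 + 1) 0 = nums[k + 1 + 1] := by
      have := pvGet nums (k + 2) (by omega)
      have hc2 : ((k + 2 : Nat) : Int) = (k : Int) + 1 + 1 := by push_cast; ring
      simpa [hc2] using this
    -- peel the last element of B's range
    have hsplit : PySem.List.pyRange 0 ((k : Int) + 1 + 1) 1
        = PySem.List.pyRange 0 ((k : Int) + 1) 1 ++ [(k : Int) + 1] :=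
      PySem.List.pyRange_one_succ_right (by omega)
    rw [hsplit, List.foldl_append]
    simp only [List.foldl, hget, hget2]
    by_cases hlt : nums[k + 1] < nums[k + 1 + 1]
    · rw [if_pos hlt, if_pos hlt, pvStepA_absorb]
    · rw [if_neg hlt, if_neg hlt]
      have hs : ((k : Int) + 1 - 1) = (k : Int) := by ring
      rw [hs]
      exact ih hk1

-- ===== VERDICT (by name: the statement is the Claim_ definition above) =====
theorem find_longest_non_increasing_suffix_spec : Claim_equal_find_longest_non_increasing_suffix := by
  intro nums _
  unfold Spec_find_longest_non_increasing_suffix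
  unfold find_longest_non_increasing_suffix find_longest_non_increasing_suffix_alt
  match nums with
  | [] => rfl
  | [a] =>
    have h1 : (([a].length : Int)) - 1 = 0 := by simp
    rw [h1, PySem.List.pyRange_neg_one_cons (by omega),
        PySem.List.pyRange_neg_one_eq_nil (by omega),
        PySem.List.pyRange_one_eq_nil (by omega)]
    rfl
  | a :: b :: t =>
    have hlen : (((a :: b :: t).length : Int)) - 1 = ((t.length : Int)) + 1 := by
      push_cast [List.length_cons]; omega
    rw [hlen, PySem.List.pyRange_neg_one_cons (by omega)]
    have h : t.length + 1 < (a :: b :: t).length := by simp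
    have hget : PySem.List.pyGetD (a :: b :: t) ((t.length : Int) + 1) 0
        = (a :: b :: t)[t.length + 1] := by
      have := pvGet (a :: b :: t) (t.length + 1) h
      simpa using this
    simp only [List.foldl]
    rw [hget]
    have hs : ((t.length : Int)) + 1 - 1 = (t.length : Int) := by ring
    rw [hs]
    exact pvMain (a :: b :: t) t.length h
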